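-- pv_equiv track=rewrite | github.com/yiyanshou/StS | data/basic_cleaning.py | floors_valid
-- ===== SOURCE A (Python) =====
-- def floors_valid(floor_reached, card_choices, relics_obtained, event_choices,
--                  damage_taken, campfire_choices, potions_floor_usage,
--                  potions_obtained, item_purchase_floors, items_purged_floors,
--                  potions_floor_spawned):
--
--     if not (0 <= floor_reached <= 57):
--         return False
--
--     try:
--         for c in card_choices:
--             if not (0 <= c['floor'] <= floor_reached):
--                 return False
--
--         for r in relics_obtained:
--             if not (0 <= r['floor'] <= floor_reached):
--                 return False
--
--         for e in event_choices:
--             if not (0 <= e['floor'] <= floor_reached):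
--                 return False
--
--         for d in damage_taken:
--             if not (0 <= d['floor'] <= floor_reached):
--                 return False
--
--         for cf in campfire_choices:
--             if not (0 <= cf['floor'] <= floor_reached):
--                 return False
--
--         for p in potions_obtained:
--             if not (0 <= p['floor'] <= floor_reached):
--                 return False
--
--     except KeyError:
--         return False
--
--
--     for pf in potions_floor_usage:
--         if not (0 <= pf <= floor_reached):
--             return False
--
--     for ip in item_purchase_floors:
--         if not (0 <= ip <= floor_reached):
--             return False
--
--     for ipg in items_purged_floors:
--         if not (0 <= ipg <= floor_reached):
--             return False
--
--     for ps in potions_floor_spawned: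
--         if not (0 <= ps <= floor_reached):
--             return False
--
--     return True
-- ===== SOURCE B (Python) =====
-- def floors_valid(floor_reached, card_choices, relics_obtained, event_choices,
--                  damage_taken, campfire_choices, potions_floor_usage,
--                  potions_obtained, item_purchase_floors, items_purged_floors,
--                  potions_floor_spawned):
--     if not (0 <= floor_reached <= 57):
--         return False
--     floors = []
--     try:
--         for lst in (card_choices, relics_obtained, event_choices, damage_taken,
--                     campfire_choices, potions_obtained):
--             for d in lst:
--                 floors.append(d['floor'])
--     except KeyError:
--         return False
--     for lst in (potions_floor_usage, item_purchase_floors, items_purged_floors,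
--                 potions_floor_spawned):
--         floors.extend(lst)
--     return min(floors, default=0) >= 0 and max(floors, default=0) <= floor_reached
-- ===== Notes on version B (the rewrite author's own statement) =====
-- stated objective: alternative
-- what changed: A checks every element with ten per-list short-circuit range tests; B collects all floor values into one merged list and decides validity from the aggregate running min and max (default 0), with the KeyError catch scoped to the dict lists only.
import Mathlib
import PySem

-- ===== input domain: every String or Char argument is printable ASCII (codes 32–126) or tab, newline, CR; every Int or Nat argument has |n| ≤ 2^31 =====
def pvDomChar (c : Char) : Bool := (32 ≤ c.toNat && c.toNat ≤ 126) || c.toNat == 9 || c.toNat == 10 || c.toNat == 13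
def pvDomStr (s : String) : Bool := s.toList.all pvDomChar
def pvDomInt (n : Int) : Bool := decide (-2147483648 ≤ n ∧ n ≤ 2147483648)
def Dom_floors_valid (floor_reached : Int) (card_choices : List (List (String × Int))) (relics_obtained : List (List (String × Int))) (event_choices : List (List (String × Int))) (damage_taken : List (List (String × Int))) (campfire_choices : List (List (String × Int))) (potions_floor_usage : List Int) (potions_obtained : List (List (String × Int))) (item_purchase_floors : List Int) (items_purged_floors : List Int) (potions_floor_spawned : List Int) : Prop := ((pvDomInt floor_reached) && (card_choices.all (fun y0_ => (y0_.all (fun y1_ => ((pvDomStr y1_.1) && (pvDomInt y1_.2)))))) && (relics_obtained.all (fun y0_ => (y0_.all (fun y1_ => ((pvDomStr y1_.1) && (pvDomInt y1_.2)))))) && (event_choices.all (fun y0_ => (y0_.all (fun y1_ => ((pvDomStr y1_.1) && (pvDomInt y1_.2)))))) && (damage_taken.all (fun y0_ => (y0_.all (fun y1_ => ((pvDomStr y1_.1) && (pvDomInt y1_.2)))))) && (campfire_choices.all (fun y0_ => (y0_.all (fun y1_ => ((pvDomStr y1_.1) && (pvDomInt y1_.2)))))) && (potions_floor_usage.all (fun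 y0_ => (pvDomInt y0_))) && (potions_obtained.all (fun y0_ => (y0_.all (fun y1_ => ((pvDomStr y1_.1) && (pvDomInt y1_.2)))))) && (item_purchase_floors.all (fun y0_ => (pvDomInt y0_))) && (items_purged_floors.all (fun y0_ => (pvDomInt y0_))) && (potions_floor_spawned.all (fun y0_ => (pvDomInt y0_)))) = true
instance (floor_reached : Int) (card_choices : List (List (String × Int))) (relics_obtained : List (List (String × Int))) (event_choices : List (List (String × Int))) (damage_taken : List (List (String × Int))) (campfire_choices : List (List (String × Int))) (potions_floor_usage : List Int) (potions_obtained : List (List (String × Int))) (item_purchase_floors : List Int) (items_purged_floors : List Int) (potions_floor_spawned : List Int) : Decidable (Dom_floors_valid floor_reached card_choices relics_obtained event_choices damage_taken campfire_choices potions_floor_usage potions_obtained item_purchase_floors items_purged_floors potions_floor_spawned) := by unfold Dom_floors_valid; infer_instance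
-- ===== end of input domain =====

-- B replaces A's ten per-element short-circuit range loops by one aggregate pass that
-- collects every floor value and checks only the running min and max (objective: alternative).

-- d['floor'] on an association list: first match, none = KeyError (used by both ports)
def pyDictGet (d : List (String × Int)) (k : String) : Option Int :=
  match d with
  | [] => none
  | (k', v) :: rest => if k' == k then some v else pyDictGet rest k

-- ===== PORT A =====
-- one of A's six dict loops: out-of-range → return False; missing key → KeyError, caught → return False
def pvA_checkDicts (fr : Int) : List (List (String × Int)) → Bool
  | [] => true
  | d :: rest =>
    match pyDictGet d "floor" with
    | none => false
    | some v => if 0 ≤ v ∧ v ≤ fr then pvA_checkDicts fr rest else false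

-- one of A's four integer loops
def pvA_checkInts (fr : Int) : List Int → Bool
  | [] => true
  | x :: rest => if 0 ≤ x ∧ x ≤ fr then pvA_checkInts fr rest else false

def floors_valid (floor_reached : Int) (card_choices : List (List (String × Int))) (relics_obtained : List (List (String × Int))) (event_choices : List (List (String × Int))) (damage_taken : List (List (String × Int))) (campfire_choices : List (List (String × Int))) (potions_floor_usage : List Int) (potions_obtained : List (List (String × Int))) (item_purchase_floors : List Int) (items_purged_floors : List Int) (potions_floor_spawned : List Int) : Bool :=
  if ¬(0 ≤ floor_reached ∧ floor_reached ≤ 57) then false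
  else
    pvA_checkDicts floor_reached card_choices &&
    pvA_checkDicts floor_reached relics_obtained &&
    pvA_checkDicts floor_reached event_choices &&
    pvA_checkDicts floor_reached damage_taken &&
    pvA_checkDicts floor_reached campfire_choices &&
    pvA_checkDicts floor_reached potions_obtained &&
    pvA_checkInts floor_reached potions_floor_usage &&
    pvA_checkInts floor_reached item_purchase_floors &&
    pvA_checkInts floor_reached items_purged_floors &&
    pvA_checkInts floor_reached potions_floor_spawned

-- ===== PORT B =====
-- collect d['floor'] of every dict; none = a KeyError occurred
def pvB_collect : List (List (String × Int)) → Option (List Int)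
  | [] => some []
  | d :: rest =>
    match pyDictGet d "floor" with
    | none => none
    | some v => (pvB_collect rest).map (fun fs => v :: fs)

-- min(xs, default=0) / max(xs, default=0)
def pvB_minD (xs : List Int) : Int :=
  match xs with
  | [] => 0
  | h :: t => t.foldl min h

def pvB_maxD (xs : List Int) : Int :=
  match xs with
  | [] => 0
  | h :: t => t.foldl max h

def floors_valid_alt (floor_reached : Int) (card_choices : List (List (String × Int))) (relics_obtained : List (List (String × Int))) (event_choices : List (List (String × Int))) (damage_taken : List (List (String × Int))) (campfire_choices : List (List (String × Int))) (potions_floor_usage : List Int) (potions_obtained : List (List (String × Int))) (item_purchase_floors : List Int) (items_purged_floors : List Int) (potions_floor_spawned : List Int) : Bool :=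
  if ¬(0 ≤ floor_reached ∧ floor_reached ≤ 57) then false
  else
    match pvB_collect (card_choices ++ relics_obtained ++ event_choices ++ damage_taken ++ campfire_choices ++ potions_obtained) with
    | none => false
    | some dfs =>
      let floors := dfs ++ potions_floor_usage ++ item_purchase_floors ++ items_purged_floors ++ potions_floor_spawned
      decide (0 ≤ pvB_minD floors) && decide (pvB_maxD floors ≤ floor_reached)

-- ===== PRECONDITION & SPEC =====
def Spec_floors_valid (floor_reached : Int) (card_choices : List (List (String × Int))) (relics_obtained : List (List (String × Int))) (event_choices : List (List (String × Int))) (damage_taken : List (List (String × Int))) (campfire_choices : List (List (String × Int))) (potions_floor_usage : List Int) (potions_obtained : List (List (String × Int))) (item_purchase_floors : List Int) (items_purged_floors : List Int) (potions_floor_spawned : List Int) (out : Bool) : Prop := out = floors_valid_alt floor_reached card_choices relics_obtained event_choices damage_taken campfire_choices potions_floor_usage potions_obtained item_purchase_floors items_purged_floors potions_floor_spawned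
instance (floor_reached : Int) (card_choices : List (List (String × Int))) (relics_obtained : List (List (String × Int))) (event_choices : List (List (String × Int))) (damage_taken : List (List (String × Int))) (campfire_choices : List (List (String × Int))) (potions_floor_usage : List Int) (potions_obtained : List (List (String × Int))) (item_purchase_floors : List Int) (items_purged_floors : List Int) (potions_floor_spawned : List Int) (out : Bool) : Decidable (Spec_floors_valid floor_reached card_choices relics_obtained event_choices damage_taken campfire_choices potions_floor_usage potions_obtained item_purchase_floors items_purged_floors potions_floor_spawned out) := by unfold Spec_floors_valid; infer_instance

-- ===== CLAIM (what is proved, stated in full; the proofs are below) =====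
def Claim_equal_floors_valid : Prop := ∀ (floor_reached : Int) (card_choices : List (List (String × Int))) (relics_obtained : List (List (String × Int))) (event_choices : List (List (String × Int))) (damage_taken : List (List (String × Int))) (campfire_choices : List (List (String × Int))) (potions_floor_usage : List Int) (potions_obtained : List (List (String × Int))) (item_purchase_floors : List Int) (items_purged_floors : List Int) (potions_floor_spawned : List Int), Dom_floors_valid floor_reached card_choices relics_obtained event_choices damage_taken campfire_choices potions_floor_usage potions_obtained item_purchase_floors items_purged_floors potions_floor_spawned → Spec_floors_valid floor_reached card_choices relics_obtained event_choices damage_taken campfire_choices potions_floor_usage potions_obtained item_purchase_floors items_purged_floors potions_floor_spawned (floors_valid floor_reached card_choices relics_obtained event_choices damage_taken campfire_choices potions_floor_usage potions_obtained item_purchase_floors items_purged_floors potions_floor_spawned)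

-- ===== LEMMAS AND PROOFS =====

lemma pvA_checkInts_iff (fr : Int) (xs : List Int) :
    pvA_checkInts fr xs = true ↔ ∀ v ∈ xs, 0 ≤ v ∧ v ≤ fr := by
  induction xs with
  | nil => simp [pvA_checkInts]
  | cons x t ih =>
    simp only [pvA_checkInts]
    split_ifs with h <;> simp_all

lemma pvA_checkDicts_iff (fr : Int) (l : List (List (String × Int))) :
    pvA_checkDicts fr l = true ↔
      ∀ d ∈ l, ∃ v, pyDictGet d "floor" = some v ∧ 0 ≤ v ∧ v ≤ fr := by
  induction l with
  | nil => simp [pvA_checkDicts]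
  | cons d t ih =>
    simp only [pvA_checkDicts]
    cases hg : pyDictGet d "floor" with
    | none => simp [hg]
    | some v =>
      by_cases h : 0 ≤ v ∧ v ≤ fr <;> simp_all

lemma pvB_collect_none_iff (l : List (List (String × Int))) :
    pvB_collect l = none ↔ ∃ d ∈ l, pyDictGet d "floor" = none := by
  induction l with
  | nil => simp [pvB_collect]
  | cons d t ih =>
    simp only [pvB_collect]
    cases hg : pyDictGet d "floor" with
    | none => simp [hg]
    | some v =>
      cases ht : pvB_collect t <;> simp_all

lemma pvB_collect_some_forall (l : List (List (String × Int))) (fs : List Int)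
    (h : pvB_collect l = some fs) (P : Int → Prop) :
    (∀ v ∈ fs, P v) ↔ ∀ d ∈ l, ∀ v, pyDictGet d "floor" = some v → P v := by
  induction l generalizing fs with
  | nil => simp [pvB_collect] at h; subst h; simp
  | cons d t ih =>
    simp only [pvB_collect] at h
    cases hg : pyDictGet d "floor" with
    | none => simp [hg] at h
    | some v =>
      rw [hg] at h
      cases ht : pvB_collect t with
      | none => simp [ht] at h
      | some fs' =>
        rw [ht] at h
        simp only [Option.map_some, Option.some.injEq] at h
        subst h
        have hiff := ih fs' ht
        constructor
        · intro hall d' hd' w hw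
          rcases List.mem_cons.mp hd' with rfl | hd''
          · rw [hg, Option.some.injEq] at hw; subst hw; exact hall _ (by simp)
          · exact (hiff.mp fun x hx => hall x (by simp [hx])) d' hd'' w hw
        · intro hall w hw
          rcases List.mem_cons.mp hw with rfl | hw'
          · exact hall d (by simp) w hg
          · exact (hiff.mpr fun d' hd' => hall d' (by simp [hd'])) w hw'

lemma foldl_min_nonneg (t : List Int) (h : Int) :
    0 ≤ t.foldl min h ↔ 0 ≤ h ∧ ∀ v ∈ t, 0 ≤ v := by
  induction t generalizing h with
  | nil => simp
  | cons a t ih =>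
    simp only [List.foldl_cons, ih, le_min_iff]
    constructor
    · rintro ⟨⟨h1, h2⟩, h3⟩; exact ⟨h1, by intro v hv; rcases List.mem_cons.mp hv with rfl | hv' <;> [exact h2; exact h3 v hv']⟩
    · rintro ⟨h1, h2⟩; exact ⟨⟨h1, h2 a (by simp)⟩, fun v hv => h2 v (by simp [hv])⟩

lemma foldl_max_le (t : List Int) (h fr : Int) :
    t.foldl max h ≤ fr ↔ h ≤ fr ∧ ∀ v ∈ t, v ≤ fr := by
  induction t generalizing h with
  | nil => simp
  | cons a t ih =>
    simp only [List.foldl_cons, ih, max_le_iff]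
    constructor
    · rintro ⟨⟨h1, h2⟩, h3⟩; exact ⟨h1, by intro v hv; rcases List.mem_cons.mp hv with rfl | hv' <;> [exact h2; exact h3 v hv']⟩
    · rintro ⟨h1, h2⟩; exact ⟨⟨h1, h2 a (by simp)⟩, fun v hv => h2 v (by simp [hv])⟩

lemma pvB_range_iff (fr : Int) (hfr : 0 ≤ fr) (xs : List Int) :
    (decide (0 ≤ pvB_minD xs) && decide (pvB_maxD xs ≤ fr)) = true ↔
      ∀ v ∈ xs, 0 ≤ v ∧ v ≤ fr := by
  cases xs with
  | nil => simp [pvB_minD, pvB_maxD, hfr]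
  | cons h t =>
    simp only [pvB_minD, pvB_maxD, Bool.and_eq_true, decide_eq_true_iff,
      foldl_min_nonneg, foldl_max_le]
    constructor
    · rintro ⟨⟨h1, h2⟩, h3, h4⟩ v hv
      rcases List.mem_cons.mp hv with rfl | hv' <;> exact ⟨by first | exact h1 | exact h2 v hv', by first | exact h3 | exact h4 v hv'⟩
    · intro hall
      exact ⟨⟨(hall h (by simp)).1, fun v hv => (hall v (by simp [hv])).1⟩,
             (hall h (by simp)).2, fun v hv => (hall v (by simp [hv])).2⟩

theorem floors_valid_eq (floor_reached : Int) (card_choices relics_obtained event_choices damage_taken campfire_choices : List (List (String × Int))) (potions_floor_usage : List Int) (potions_obtained : List (List (String × Int))) (item_purchase_floors items_purged_floors potions_floor_spawned : List Int) :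
    floors_valid floor_reached card_choices relics_obtained event_choices damage_taken campfire_choices potions_floor_usage potions_obtained item_purchase_floors items_purged_floors potions_floor_spawned
      = floors_valid_alt floor_reached card_choices relics_obtained event_choices damage_taken campfire_choices potions_floor_usage potions_obtained item_purchase_floors items_purged_floors potions_floor_spawned := by
  unfold floors_valid floors_valid_alt
  by_cases hfr : 0 ≤ floor_reached ∧ floor_reached ≤ 57
  · rw [if_neg (not_not_intro hfr), if_neg (not_not_intro hfr)]
    set L := card_choices ++ relics_obtained ++ event_choices ++ damage_taken ++ campfire_choices ++ potions_obtained with hL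
    cases hcol : pvB_collect L with
    | none =>
      have hnone := (pvB_collect_none_iff L).mp hcol
      rcases hnone with ⟨d, hd, hg⟩
      have hfalse : ∀ l : List (List (String × Int)), d ∈ l → pvA_checkDicts floor_reached l = false := by
        intro l hdl
        cases hcheck : pvA_checkDicts floor_reached l with
        | false => rfl
        | true =>
          rcases (pvA_checkDicts_iff floor_reached l).mp hcheck d hdl with ⟨v, hv, _⟩
          rw [hg] at hv; cases hv
      rw [hL] at hd
      simp only [List.mem_append] at hd
      rcases hd with ((((h1 | h1) | h1) | h1) | h1) | h1 <;>
        simp [hfalse _ h1]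
    | some dfs =>
      rw [Bool.eq_iff_iff]
      simp only [pvB_range_iff floor_reached hfr.1]
      simp only [Bool.and_eq_true, pvA_checkDicts_iff, pvA_checkInts_iff]
      have hforall := pvB_collect_some_forall L dfs hcol (fun v => 0 ≤ v ∧ v ≤ floor_reached)
      have hhas : ∀ d ∈ L, ∃ v, pyDictGet d "floor" = some v := by
        intro d hd
        cases hg : pyDictGet d "floor" with
        | none => exact absurd ((pvB_collect_none_iff L).mpr ⟨d, hd, hg⟩) (by simp [hcol])
        | some v => exact ⟨v, rfl⟩
      constructor
      · rintro ⟨⟨⟨⟨⟨⟨⟨⟨⟨hc1, hc2⟩, hc3⟩, hc4⟩, hc5⟩, hc6⟩, hi1⟩, hi2⟩, hi3⟩, hi4⟩ v hv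
        simp only [List.mem_append] at hv
        rcases hv with ((((hv | hv) | hv) | hv) | hv)
        · refine hforall.mpr ?_ v hv
          intro d hd w hw
          rw [hL] at hd; simp only [List.mem_append] at hd
          rcases hd with ((((h1 | h2) | h3) | h4) | h5) | h6
          · rcases hc1 d h1 with ⟨w', hw', hr⟩; rw [hw] at hw'; cases hw'; exact hr
          · rcases hc2 d h2 with ⟨w', hw', hr⟩; rw [hw] at hw'; cases hw'; exact hr
          · rcases hc3 d h3 with ⟨w', hw', hr⟩; rw [hw] at hw'; cases hw'; exact hr
          · rcases hc4 d h4 with ⟨w', hw', hr⟩; rw [hw] at hw'; cases hw'; exact hr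
          · rcases hc5 d h5 with ⟨w', hw', hr⟩; rw [hw] at hw'; cases hw'; exact hr
          · rcases hc6 d h6 with ⟨w', hw', hr⟩; rw [hw] at hw'; cases hw'; exact hr
        · exact hi1 v hv
        · exact hi2 v hv
        · exact hi3 v hv
        · exact hi4 v hv
      · intro hall
        have hdict : ∀ d ∈ L, ∃ v, pyDictGet d "floor" = some v ∧ 0 ≤ v ∧ v ≤ floor_reached := by
          intro d hd
          rcases hhas d hd with ⟨v, hv⟩
          refine ⟨v, hv, ?_⟩
          exact hforall.mp (fun w hw => hall w (by simp [hw])) d hd v hv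
        have hsub : ∀ (l : List (List (String × Int))), (∀ d ∈ l, d ∈ L) →
            ∀ d ∈ l, ∃ v, pyDictGet d "floor" = some v ∧ 0 ≤ v ∧ v ≤ floor_reached :=
          fun l hsub d hd => hdict d (hsub d hd)
        refine ⟨⟨⟨⟨⟨⟨⟨⟨⟨hsub card_choices (fun d hd => by rw [hL]; simp [hd]),
                hsub relics_obtained (fun d hd => by rw [hL]; simp [hd])⟩,
                hsub event_choices (fun d hd => by rw [hL]; simp [hd])⟩,
                hsub damage_taken (fun d hd => by rw [hL]; simp [hd])⟩,
                hsub campfire_choices (fun d hd => by rw [hL]; simp [hd])⟩,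
                hsub potions_obtained (fun d hd => by rw [hL]; simp [hd])⟩,
                ?_⟩, ?_⟩, ?_⟩, ?_⟩ <;>
          · intro v hv; exact hall v (by simp [hv])
  · simp [hfr]

-- ===== VERDICT (by name: the statement is the Claim_ definition above) =====
theorem floors_valid_spec : Claim_equal_floors_valid := by
  intro fr cd ro ec dt cc pfu po ipf ipg pfs _
  unfold Spec_floors_valid
  exact floors_valid_eq fr cd ro ec dt cc pfu po ipf ipg pfs
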